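-- pv_equiv track=rewrite | github.com/Nahuelbonet/pp_programacion_1 | Paquetes/depositos_mayor_50k.py | depositos_mayor_50k
-- ===== SOURCE A (Python) =====
-- def depositos_mayor_50k(inventario):
--     provincias = []
--
--     total_por_provincia = {}
--
--     for i in range(len(inventario)):
--         provincia = inventario[i][0]
--         cantidad = inventario[i][2]
--
--
--         if provincia in total_por_provincia:
--             total_por_provincia[provincia] += cantidad
--         else:
--             total_por_provincia[provincia] = cantidad
--
--
--     for provincia, total in total_por_provincia.items():
--         if total > 50000:
--             provincias += [provincia]
--
--     return provincias
-- ===== SOURCE B (Python) =====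
-- def depositos_mayor_50k(inventario):
--     distintas = []
--     for fila in inventario:
--         if fila[0] not in distintas:
--             distintas.append(fila[0])
--     return [p for p in distintas
--             if sum(fila[2] for fila in inventario if fila[0] == p) > 50000]
-- ===== Notes on version B (the rewrite author's own statement) =====
-- stated objective: simpler
-- what changed: Replaces A's single-pass dict-grouping with an ordered distinct-province list plus a per-province re-scan sum in a list comprehension; no dict is built.
import Mathlib
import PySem

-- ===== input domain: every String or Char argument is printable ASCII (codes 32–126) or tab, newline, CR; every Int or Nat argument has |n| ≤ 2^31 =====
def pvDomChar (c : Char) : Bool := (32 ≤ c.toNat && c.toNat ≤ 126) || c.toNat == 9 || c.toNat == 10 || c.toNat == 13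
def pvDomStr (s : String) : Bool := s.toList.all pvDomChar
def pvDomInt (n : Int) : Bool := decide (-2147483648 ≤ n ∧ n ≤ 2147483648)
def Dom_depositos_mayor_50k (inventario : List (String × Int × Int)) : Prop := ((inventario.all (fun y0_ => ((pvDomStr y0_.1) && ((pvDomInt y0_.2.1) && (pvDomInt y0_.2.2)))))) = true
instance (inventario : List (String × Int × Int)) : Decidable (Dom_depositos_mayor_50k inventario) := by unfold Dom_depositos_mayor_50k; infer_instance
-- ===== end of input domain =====

-- B drops A's dict-grouping pass: it keeps an ordered list of distinct provinces and
-- re-scans the inventory to sum each province's deposits (simpler, no dict; not faster).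


-- ===== PORT A =====
def depositos_mayor_50k (inventario : List (String × Int × Int)) : List String :=
  let total_por_provincia : PySem.Dict String Int :=
    inventario.foldl (fun d fila =>
      if d.contains fila.1 then d.insert fila.1 (d.getD fila.1 0 + fila.2.2)
      else d.insert fila.1 fila.2.2) PySem.Dict.empty
  total_por_provincia.items.foldl
    (fun provincias pt => if pt.2 > 50000 then provincias ++ [pt.1] else provincias) []

-- ===== PORT B =====
def altTotal (inventario : List (String × Int × Int)) (p : String) : Int :=
  ((inventario.filter (fun fila => fila.1 == p)).map (fun fila => fila.2.2)).sum

def depositos_mayor_50k_alt (inventario : List (String × Int × Int)) : List String :=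
  let distintas : List String :=
    inventario.foldl (fun ds fila => if fila.1 ∈ ds then ds else ds ++ [fila.1]) []
  distintas.filter (fun p => decide (altTotal inventario p > 50000))

-- ===== PRECONDITION & SPEC =====
def Spec_depositos_mayor_50k (inventario : List (String × Int × Int)) (out : List String) : Prop := out = depositos_mayor_50k_alt inventario
instance (inventario : List (String × Int × Int)) (out : List String) : Decidable (Spec_depositos_mayor_50k inventario out) := by unfold Spec_depositos_mayor_50k; infer_instance

-- ===== CLAIM (what is proved, stated in full; the proofs are below) =====
def Claim_equal_depositos_mayor_50k : Prop := ∀ (inventario : List (String × Int × Int)), Dom_depositos_mayor_50k inventario → Spec_depositos_mayor_50k inventario (depositos_mayor_50k inventario)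

-- ===== LEMMAS AND PROOFS =====

-- A's if/else grouping step is one Dict.modify.
theorem stepA_eq_modify (d : PySem.Dict String Int) (fila : String × Int × Int) :
    (if d.contains fila.1 then d.insert fila.1 (d.getD fila.1 0 + fila.2.2)
     else d.insert fila.1 fila.2.2) = d.modify fila.1 0 (· + fila.2.2) := by
  by_cases h : d.contains fila.1
  · simp [h, PySem.Dict.modify]
  · have h0 : d.contains fila.1 = false := by simpa using h
    simp [h0, PySem.Dict.modify, PySem.Dict.getD_of_not_contains]

-- The total stored for any province after the grouping loop.
theorem getD_buildD (l : List (String × Int × Int)) (d : PySem.Dict String Int) (p : String) :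
    (l.foldl (fun d fila => d.modify fila.1 0 (· + fila.2.2)) d).getD p 0
      = d.getD p 0 + altTotal l p := by
  induction l generalizing d with
  | nil => simp [altTotal]
  | cons r l ih =>
      simp only [List.foldl_cons, ih, altTotal, List.filter_cons]
      by_cases h : p = r.1
      · subst h
        simp [PySem.Dict.getD_modify_self]; ring
      · simp [PySem.Dict.getD_modify, h, Ne.symm h]

theorem depositos_mayor_50k_eq (inventario : List (String × Int × Int)) :
    depositos_mayor_50k inventario = depositos_mayor_50k_alt inventario := by
  unfold depositos_mayor_50k depositos_mayor_50k_alt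
  dsimp only
  -- rewrite A's grouping fold as a modify fold
  rw [PySem.List.foldl_congr_mem inventario _
      (fun d fila => PySem.Dict.modify d fila.1 0 (· + fila.2.2)) _
      (fun acc x _ => stepA_eq_modify acc x)]
  -- rewrite B's distinct fold as Set.ofList of the provinces
  rw [PySem.List.foldl_congr_mem inventario _
      (fun ds fila => PySem.Set.add ds fila.1) _
      (fun acc x _ => (PySem.Set.add_eq_ite acc x.1).symm),
    ← PySem.Set.update_map_eq_foldl_add, PySem.Set.update_nil_left]
  set D := inventario.foldl (fun d fila => PySem.Dict.modify d fila.1 0 (· + fila.2.2)) PySem.Dict.empty with hD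
  have hkeys : D.keys = PySem.Set.ofList (inventario.map (·.1)) := by
    rw [hD, PySem.Dict.keys_foldl_modify_key, PySem.Dict.keys_empty, PySem.Set.update_nil_left]
  have hnd : D.keys.Nodup := hkeys ▸ PySem.Set.nodup_ofList _
  rw [PySem.Dict.items_eq_map_keys D hnd 0, List.foldl_map, hkeys]
  have hstep : ∀ (acc : List String) (k : String),
      (if (k, D.getD k 0).2 > 50000 then acc ++ [k] else acc)
        = (if altTotal inventario k > 50000 then acc ++ [k] else acc) := by
    intro acc k
    have : D.getD k 0 = altTotal inventario k := by
      rw [hD, getD_buildD, PySem.Dict.getD_empty, zero_add]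
    simp [this]
  rw [PySem.List.foldl_congr_mem (PySem.Set.ofList (inventario.map (·.1))) _
      (fun acc k => if altTotal inventario k > 50000 then acc ++ [k] else acc) _
      (fun acc x _ => hstep acc x),
    PySem.List.foldl_append_ite_eq_filter]
  simp

-- ===== VERDICT (by name: the statement is the Claim_ definition above) =====
theorem depositos_mayor_50k_spec : Claim_equal_depositos_mayor_50k := by
  intro inventario _
  unfold Spec_depositos_mayor_50k
  exact depositos_mayor_50k_eq inventario
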